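-- pv_equiv track=rewrite | github.com/mnaberez/k0emu | k0emu/system.py | _eeprom_checksum
-- ===== SOURCE A (Python) =====
-- def _eeprom_checksum(data, start, length):
--     """Compute the EEPROM checksum the same way the firmware does.
--     Initial X=0x55, A=0x00.  For each byte: add to X, carry into A."""
--     x = 0x55
--     a = 0x00
--     for i in range(length):
--         sum_x = x + data[start + i]
--         carry = 1 if sum_x > 0xFF else 0
--         x = sum_x & 0xFF
--         a = (a + carry) & 0xFF
--     return (a << 8) | x
-- ===== SOURCE B (Python) =====
-- def _eeprom_checksum(data, start, length):
--     """Checksum via prefix sums: the low register is the running total mod 256,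
--     and a carry occurs exactly when the prefix sum crosses a 256 boundary upward."""
--     prefix = [0x55]
--     for i in range(length):
--         prefix.append(prefix[-1] + data[start + i])
--     carries = sum(1 for lo, hi in zip(prefix, prefix[1:]) if hi // 256 > lo // 256)
--     return ((carries % 256) << 8) | (prefix[-1] % 256)
-- ===== Notes on version B (the rewrite author's own statement) =====
-- stated objective: alternative
-- what changed: Replaces A's per-byte 8-bit register/carry state machine (x, a updated with & 0xFF each step) by building the list of raw prefix sums, reading the low byte as the final prefix sum mod 256 and counting carries as upward 256-boundary crossings between consecutive prefix sums.
import Mathlib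
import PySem

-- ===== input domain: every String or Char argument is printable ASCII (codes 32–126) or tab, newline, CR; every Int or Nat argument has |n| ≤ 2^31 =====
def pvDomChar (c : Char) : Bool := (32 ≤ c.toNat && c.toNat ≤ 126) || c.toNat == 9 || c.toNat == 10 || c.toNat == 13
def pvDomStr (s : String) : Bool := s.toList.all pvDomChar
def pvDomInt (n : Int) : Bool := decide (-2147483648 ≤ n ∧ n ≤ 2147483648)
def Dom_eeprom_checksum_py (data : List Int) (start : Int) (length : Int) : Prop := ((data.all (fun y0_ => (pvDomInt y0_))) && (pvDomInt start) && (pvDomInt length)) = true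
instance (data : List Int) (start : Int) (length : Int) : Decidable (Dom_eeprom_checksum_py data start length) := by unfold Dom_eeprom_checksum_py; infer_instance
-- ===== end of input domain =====

-- B replaces A's per-byte 8-bit register/carry state machine by prefix sums: the low byte is the
-- running total mod 256 and a carry happens exactly when a prefix sum crosses a 256 boundary upward
-- (objective: alternative decomposition, same cost).

-- ===== PORT A =====
-- loop body of A's for-loop (x, a registers; none = IndexError already raised)
def pvStepA (data : List Int) (start : Int) (st : Option (Int × Int)) (i : Int) : Option (Int × Int) :=
  match st with
  | none => none
  | some (x, a) =>
    match PySem.List.pyGet? data (start + i) with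
    | none => none
    | some d =>
      let sum_x := x + d
      let carry : Int := if sum_x > 0xFF then 1 else 0
      some (PySem.Int.band sum_x 0xFF, PySem.Int.band (a + carry) 0xFF)

def eeprom_checksum_py (data : List Int) (start : Int) (length : Int) : Int :=
  match (PySem.List.pyRange 0 length 1).foldl (pvStepA data start) (some (0x55, 0x00)) with
  | none => 0  -- unreachable under Pre_: Python raises IndexError here
  | some (x, a) => PySem.Int.bor (a <<< 8) x

-- ===== PORT B =====
-- loop body of B's prefix-building loop
def pvStepB (data : List Int) (start : Int) (st : Option (List Int)) (i : Int) : Option (List Int) :=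
  match st with
  | none => none
  | some p =>
    match PySem.List.pyGet? data (start + i) with
    | none => none
    | some d => some (p ++ [PySem.List.pyGetD p (-1) 0 + d])

def eeprom_checksum_py_alt (data : List Int) (start : Int) (length : Int) : Int :=
  match (PySem.List.pyRange 0 length 1).foldl (pvStepB data start) (some [0x55]) with
  | none => 0  -- unreachable under Pre_: Python raises IndexError here
  | some p =>
    let carries : Int :=
      ((p.zip p.tail).filter
        (fun q => PySem.Int.floordiv q.2 256 > PySem.Int.floordiv q.1 256)).length
    PySem.Int.bor (PySem.Int.mod carries 256 <<< 8) (PySem.Int.mod (PySem.List.pyGetD p (-1) 0) 256)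

-- ===== PRECONDITION & SPEC =====
-- Pre_ excludes exactly the inputs where data[start + i] raises IndexError in Python.
def Pre_eeprom_checksum_py (data : List Int) (start : Int) (length : Int) : Prop :=
  0 < length → (-(data.length : Int) ≤ start ∧ start + length ≤ (data.length : Int))
instance (data : List Int) (start : Int) (length : Int) : Decidable (Pre_eeprom_checksum_py data start length) := by unfold Pre_eeprom_checksum_py; infer_instance
def pvWitness_eeprom_checksum_py : List Int × Int × Int := ([200, 100, 7], 0, 3)

def Spec_eeprom_checksum_py (data : List Int) (start : Int) (length : Int) (out : Int) : Prop := out = eeprom_checksum_py_alt data start length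
instance (data : List Int) (start : Int) (length : Int) (out : Int) : Decidable (Spec_eeprom_checksum_py data start length out) := by unfold Spec_eeprom_checksum_py; infer_instance

-- ===== CLAIM (what is proved, stated in full; the proofs are below) =====
def Claim_equal_eeprom_checksum_py : Prop := ∀ (data : List Int) (start : Int) (length : Int), Dom_eeprom_checksum_py data start length → Pre_eeprom_checksum_py data start length → Spec_eeprom_checksum_py data start length (eeprom_checksum_py data start length)

-- ===== LEMMAS AND PROOFS =====

-- number of upward 256-boundary crossings along the prefix list (B's `carries`)
def pvCarries (p : List Int) : Int :=
  ((p.zip p.tail).filter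
    (fun q => PySem.Int.floordiv q.2 256 > PySem.Int.floordiv q.1 256)).length

-- the abstraction from B's prefix list to A's register pair
def pvAbs (p : List Int) : Int × Int :=
  (PySem.Int.mod (p.getLastD 0) 256, PySem.Int.mod (pvCarries p) 256)

theorem pv_getLast_eq (p : List Int) (hp : p ≠ []) : p.getLast hp = p.getLastD 0 := by
  simp [List.getLastD_eq_getLast?, List.getLast?_eq_some_getLast hp]

theorem pv_band_255 (a : Int) : PySem.Int.band a 0xFF = PySem.Int.mod a 256 := by
  have hm : PySem.Int.mod a 256 = a % 256 := PySem.Int.mod_eq_emod_of_pos (by norm_num)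
  have h255 : ((0xFF : Int)).toNat = 255 := rfl
  unfold PySem.Int.band
  rcases le_or_gt 0 a with h | h
  · rw [if_pos h, if_pos (by norm_num), h255]
    have h2 : a.toNat &&& 255 = a.toNat % 256 := by
      simpa using Nat.and_two_pow_sub_one_eq_mod a.toNat 8
    rw [h2, hm]; omega
  · rw [if_neg (by omega), if_pos (by norm_num), h255]
    have h2 : 255 &&& (-a - 1).toNat = (-a - 1).toNat % 256 := by
      rw [Nat.land_comm]
      simpa using Nat.and_two_pow_sub_one_eq_mod ((-a - 1).toNat) 8
    rw [h2, hm]; omega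

theorem pv_zip_tail_append (p : List Int) (hp : p ≠ []) (y : Int) :
    (p ++ [y]).zip (p ++ [y]).tail = p.zip p.tail ++ [(p.getLastD 0, y)] := by
  induction p with
  | nil => simp at hp
  | cons x xs ih =>
    cases xs with
    | nil => simp
    | cons z zs =>
      have := ih (by simp)
      simp only [List.cons_append, List.tail_cons, List.zip_cons_cons] at this ⊢
      rw [this]; simp [List.getLastD]

theorem pv_foldA_none (data : List Int) (start : Int) (is : List Int) :
    is.foldl (pvStepA data start) none = none := by
  induction is with
  | nil => rfl
  | cons i is ih => simpa [List.foldl, pvStepA] using ih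

theorem pv_foldB_none (data : List Int) (start : Int) (is : List Int) :
    is.foldl (pvStepB data start) none = none := by
  induction is with
  | nil => rfl
  | cons i is ih => simpa [List.foldl, pvStepB] using ih

-- carry condition: the 8-bit overflow test equals the prefix-sum "page" increase test
theorem pv_carry_iff (s d : Int) :
    (PySem.Int.mod s 256 + d > 0xFF) ↔
      PySem.Int.floordiv (s + d) 256 > PySem.Int.floordiv s 256 := by
  rw [PySem.Int.mod_eq_emod_of_pos (by norm_num : (0:Int) < 256),
    PySem.Int.floordiv_eq_ediv_of_pos (by norm_num : (0:Int) < 256),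
    PySem.Int.floordiv_eq_ediv_of_pos (by norm_num : (0:Int) < 256)]
  omega

theorem pv_carries_append (p : List Int) (hp : p ≠ []) (d : Int) :
    pvCarries (p ++ [p.getLastD 0 + d]) =
      pvCarries p + (if PySem.Int.floordiv (p.getLastD 0 + d) 256 >
          PySem.Int.floordiv (p.getLastD 0) 256 then 1 else 0) := by
  unfold pvCarries
  rw [pv_zip_tail_append p hp, List.filter_append, List.filter_singleton]
  by_cases h : PySem.Int.floordiv (p.getLastD 0 + d) 256 > PySem.Int.floordiv (p.getLastD 0) 256
  · simp only [h, decide_true, cond_true, List.length_append, List.length_singleton]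
    push_cast; ring
  · simp only [h, decide_false, cond_false, List.append_nil]
    push_cast; ring

-- one loop step commutes with the abstraction
theorem pv_step_comm (data : List Int) (start i : Int) (p : List Int) (hp : p ≠ []) :
    pvStepA data start (some (pvAbs p)) i =
      Option.map pvAbs (pvStepB data start (some p) i) ∧
      (∀ p', pvStepB data start (some p) i = some p' → p' ≠ []) := by
  unfold pvStepA pvStepB
  cases hg : PySem.List.pyGet? data (start + i) with
  | none => exact ⟨rfl, by intro p' h; simp at h⟩
  | some d =>
    have hlast : PySem.List.pyGetD p (-1) 0 = p.getLastD 0 := by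
      rw [PySem.List.pyGetD_neg_one p 0 hp, pv_getLast_eq p hp]
    refine ⟨?_, by intro p' h; simp only [Option.some.injEq] at h; simp [← h]⟩
    simp only [Option.map_some, Option.some.injEq, pvAbs, hlast]
    have hl2 : (p ++ [p.getLastD 0 + d]).getLastD 0 = p.getLastD 0 + d := by simp
    rw [hl2, pv_carries_append p hp d, Prod.mk.injEq]
    constructor
    · -- low byte
      rw [pv_band_255,
        PySem.Int.mod_eq_emod_of_pos (by norm_num : (0:Int) < 256),
        PySem.Int.mod_eq_emod_of_pos (by norm_num : (0:Int) < 256),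
        PySem.Int.mod_eq_emod_of_pos (by norm_num : (0:Int) < 256)]
      omega
    · -- carry byte
      rw [pv_band_255]
      by_cases hcar : PySem.Int.mod (p.getLastD 0) 256 + d > 0xFF
      · rw [if_pos hcar, if_pos ((pv_carry_iff _ _).mp hcar)]
        rw [PySem.Int.mod_eq_emod_of_pos (by norm_num : (0:Int) < 256),
          PySem.Int.mod_eq_emod_of_pos (by norm_num : (0:Int) < 256),
          PySem.Int.mod_eq_emod_of_pos (by norm_num : (0:Int) < 256)]
        omega
      · rw [if_neg hcar, if_neg (fun h => hcar ((pv_carry_iff _ _).mpr h))]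
        rw [PySem.Int.mod_eq_emod_of_pos (by norm_num : (0:Int) < 256),
          PySem.Int.mod_eq_emod_of_pos (by norm_num : (0:Int) < 256),
          PySem.Int.mod_eq_emod_of_pos (by norm_num : (0:Int) < 256)]
        omega

-- the whole fold commutes with the abstraction
theorem pv_fold_comm (data : List Int) (start : Int) (is : List Int) :
    ∀ p : List Int, p ≠ [] →
      is.foldl (pvStepA data start) (some (pvAbs p)) =
        Option.map pvAbs (is.foldl (pvStepB data start) (some p)) ∧
      (∀ p', is.foldl (pvStepB data start) (some p) = some p' → p' ≠ []) := by
  induction is with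
  | nil => intro p hp; exact ⟨rfl, by intro p' h; simp only [List.foldl_nil, Option.some.injEq] at h; simpa [← h] using hp⟩
  | cons i is ih =>
    intro p hp
    obtain ⟨hstep, hne⟩ := pv_step_comm data start i p hp
    simp only [List.foldl]
    cases hB : pvStepB data start (some p) i with
    | none =>
      rw [hB] at hstep
      simp only [Option.map_none] at hstep
      rw [hstep, pv_foldA_none, pv_foldB_none]
      exact ⟨rfl, by intro p' h; simp at h⟩
    | some p' =>
      rw [hB] at hstep
      simp only [Option.map_some] at hstep
      rw [hstep]
      exact ih p' (hne p' hB)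

theorem pv_main (data : List Int) (start : Int) (length : Int) :
    eeprom_checksum_py data start length = eeprom_checksum_py_alt data start length := by
  unfold eeprom_checksum_py eeprom_checksum_py_alt
  have h0 : pvAbs [0x55] = (0x55, 0x00) := by decide
  obtain ⟨hfold, hne⟩ :=
    pv_fold_comm data start (PySem.List.pyRange 0 length 1) [0x55] (by simp)
  rw [h0] at hfold
  rw [hfold]
  cases hB : (PySem.List.pyRange 0 length 1).foldl (pvStepB data start) (some [0x55]) with
  | none => rfl
  | some p =>
    have hp : p ≠ [] := hne p hB
    have hlast : PySem.List.pyGetD p (-1) 0 = p.getLastD 0 := by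
      rw [PySem.List.pyGetD_neg_one p 0 hp, pv_getLast_eq p hp]
    simp only [Option.map_some, pvAbs, hlast]
    rfl

-- ===== VERDICT (by name: the statement is the Claim_ definition above) =====
theorem eeprom_checksum_py_spec : Claim_equal_eeprom_checksum_py := by
  intro data start length _ _
  unfold Spec_eeprom_checksum_py
  exact pv_main data start length
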